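-- pv_equiv track=rewrite | github.com/ViniciusCassemira/Advent-of-Code | 2015/day5.py | doublePair
-- ===== SOURCE A (Python) =====
-- def compairArray(array):
--     for i in range(len(array)):
--         for j in range(i + 1, len(array)):
--             if array[i]["data"] == array[j]["data"]:
--                 if abs(array[i]["x"] - array[j]["x"]) >= 2:
--                     return True
--     return False
--
-- def doublePair(string):
--     datas = []
--     for i in range(len(string)-1):
--     #agrupar por dupla e pegar as coordenadas de cada letra
--         pair = string[i]+string[i+1]
--         x = i
--         y = i + 1
--
--         data = {
--             "data": pair,
--             "x": x,
--             "y": y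
--         }
--         datas.append(data)
--     return compairArray(datas)
-- ===== SOURCE B (Python) =====
-- def doublePair(string):
--     first = {}
--     for i in range(len(string) - 1):
--         pair = string[i:i+2]
--         if pair in first:
--             if i - first[pair] >= 2:
--                 return True
--         else:
--             first[pair] = i
--     return False
-- ===== Notes on version B (the rewrite author's own statement) =====
-- stated objective: faster
-- what changed: Replaced A's materialised pair-record list plus quadratic all-pairs comparison with a single left-to-right pass that stores the first index of each two-char pair in a dict and reports success when the current index is at least 2 past it.
import Mathlib
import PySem

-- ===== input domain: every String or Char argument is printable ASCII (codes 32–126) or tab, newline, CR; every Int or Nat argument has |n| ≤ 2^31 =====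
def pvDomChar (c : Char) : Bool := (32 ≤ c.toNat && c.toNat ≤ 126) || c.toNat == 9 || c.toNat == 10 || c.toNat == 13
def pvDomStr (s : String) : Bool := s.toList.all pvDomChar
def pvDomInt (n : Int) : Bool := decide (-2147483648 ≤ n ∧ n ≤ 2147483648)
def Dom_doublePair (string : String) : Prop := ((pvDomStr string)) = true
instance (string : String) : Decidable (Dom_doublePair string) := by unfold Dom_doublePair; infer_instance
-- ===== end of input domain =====

-- B replaces A's quadratic all-pairs comparison by a single pass that stores the first
-- index of each two-char pair in a dict and checks gap ≥ 2 (objective: faster, O(n^2) → O(n)).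


-- ===== PORT A =====
-- the dicts A builds have fixed string keys "data"/"x"/"y" with values of two types,
-- ported as a record
structure PvPairData where
  data : List Char
  x : Int
  y : Int
deriving DecidableEq, Repr

def pvPD0 : PvPairData := ⟨[], 0, 0⟩

-- inner 'for j in range(i+1, len(array))' loop with early return
def compairJ (array : List PvPairData) (ai : PvPairData) : List Int → Bool
  | [] => false
  | j :: js =>
    if ai.data = (PySem.List.pyGetD array j pvPD0).data then
      if 2 ≤ |ai.x - (PySem.List.pyGetD array j pvPD0).x| then true
      else compairJ array ai js
    else compairJ array ai js

-- outer 'for i in range(len(array))' loop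
def compairI (array : List PvPairData) : List Int → Bool
  | [] => false
  | i :: is =>
    if compairJ array (PySem.List.pyGetD array i pvPD0)
        (PySem.List.pyRange (i + 1) (array.length : Int) 1) then true
    else compairI array is

def compairArray (array : List PvPairData) : Bool :=
  compairI array (PySem.List.pyRange 0 (array.length : Int) 1)

def doublePair (string : String) : Bool :=
  let cs := string.toList
  let datas := (PySem.List.pyRange 0 ((cs.length : Int) - 1) 1).map
    (fun i => { data := [PySem.List.pyGetD cs i ' ', PySem.List.pyGetD cs (i + 1) ' '],
                x := i, y := i + 1 : PvPairData })
  compairArray datas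

-- ===== PORT B =====
-- single pass: `first` maps each pair to the index of its first occurrence; report
-- success when the current index is ≥ 2 beyond it
def altLoop : List Char → Int → PySem.Dict (List Char) Int → Bool
  | c1 :: c2 :: rest, i, first =>
    match first.get? [c1, c2] with
    | some f => if 2 ≤ i - f then true else altLoop (c2 :: rest) (i + 1) first
    | none => altLoop (c2 :: rest) (i + 1) (first.insert [c1, c2] i)
  | _, _, _ => false

def doublePair_alt (string : String) : Bool :=
  altLoop string.toList 0 PySem.Dict.empty

-- ===== PRECONDITION & SPEC =====
def Spec_doublePair (string : String) (out : Bool) : Prop := out = doublePair_alt string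
instance (string : String) (out : Bool) : Decidable (Spec_doublePair string out) := by unfold Spec_doublePair; infer_instance

-- ===== CLAIM (what is proved, stated in full; the proofs are below) =====
def Claim_equal_doublePair : Prop := ∀ (string : String), Dom_doublePair string → Spec_doublePair string (doublePair string)

-- ===== LEMMAS AND PROOFS =====

-- the list of adjacent two-char pairs of cs
def pvPairs : List Char → List (List Char)
  | a :: b :: r => [a, b] :: pvPairs (b :: r)
  | _ => []

-- the common characterisation: some pair recurs at distance ≥ 2
def pvE (ps : List (List Char)) : Prop :=
  ∃ a b : Nat, a + 2 ≤ b ∧ b < ps.length ∧ ps[a]? = ps[b]?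

-- proof-side mirror of altLoop over the explicit list of adjacent pairs
def pvScan : List (List Char) → Int → PySem.Dict (List Char) Int → Bool
  | p :: ps, i, first =>
    match first.get? p with
    | some f => if 2 ≤ i - f then true else pvScan ps (i + 1) first
    | none => pvScan ps (i + 1) (first.insert p i)
  | [], _, _ => false

theorem altLoop_eq_pvScan (cs : List Char) : ∀ (i : Int) (first : PySem.Dict (List Char) Int),
    altLoop cs i first = pvScan (pvPairs cs) i first := by
  induction cs using pvPairs.induct with
  | case1 a b r ih =>
    intro i first
    simp only [altLoop, pvPairs, pvScan]
    cases first.get? [a, b] with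
    | some f => by_cases h : 2 ≤ i - f <;> simp [h, ih]
    | none => simp [ih]
  | case2 cs h1 =>
    intro i first
    match cs, h1 with
    | [], _ => rfl
    | [a], _ => rfl
    | a :: b :: r, h1 => exact (h1 a b r rfl).elim

theorem full_get_head {α : Type} (hs ps : List α) (p : α) :
    (hs ++ p :: ps)[hs.length]? = some p := by
  rw [List.getElem?_append_right le_rfl]
  simp

theorem pvScan_iff (ps : List (List Char)) : ∀ (hs : List (List Char)) (first : PySem.Dict (List Char) Int),
    (∀ p, first.get? p = (PySem.List.index? hs p).map (fun k => (k : Int))) →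
    (pvScan ps (hs.length : Int) first = true ↔
      ∃ a b : Nat, a + 2 ≤ b ∧ hs.length ≤ b ∧ b < hs.length + ps.length ∧
        (hs ++ ps)[a]? = (hs ++ ps)[b]?) := by
  induction ps with
  | nil =>
    intro hs first hf
    simp only [pvScan, List.length_nil, List.append_nil]
    constructor
    · intro h; exact absurd h (by simp)
    · rintro ⟨a, b, h1, h2, h3, h4⟩; omega
  | cons p ps ih =>
    intro hs first hf
    have hfull : hs ++ p :: ps = (hs ++ [p]) ++ ps := by simp
    have hlen1 : ((hs ++ [p]).length : Int) = (hs.length : Int) + 1 := by simp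
    have hhead : (hs ++ p :: ps)[hs.length]? = some p := full_get_head hs ps p
    -- no earlier occurrence at distance ≥ 2 from position hs.length ↔ related to first occurrence
    simp only [pvScan]
    cases hg : first.get? p with
    | some f =>
      have hidx : (PySem.List.index? hs p).map (fun k => (k : Int)) = some f := by
        rw [← hf]; exact hg
      obtain ⟨f', hf', rfl⟩ : ∃ f', PySem.List.index? hs p = some f' ∧ f = (f' : Int) := by
        cases hix : PySem.List.index? hs p with
        | none => rw [hix] at hidx; simp at hidx
        | some k => rw [hix] at hidx; simp at hidx; exact ⟨k, rfl, hidx.symm⟩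
      obtain ⟨hk, hkp, hmin⟩ := PySem.List.getElem_of_index?_eq_some hf'
      by_cases h2 : 2 ≤ (hs.length : Int) - (f' : Int)
      · simp only [h2, if_true, true_iff]
        refine ⟨f', hs.length, by omega, le_rfl, by simp, ?_⟩
        rw [hhead, List.getElem?_append_left hk, List.getElem?_eq_getElem hk, hkp]
      · simp only [h2, if_false]
        -- invariant is preserved with history hs ++ [p]
        have hf2 : ∀ q, first.get? q = (PySem.List.index? (hs ++ [p]) q).map (fun k => (k : Int)) := by
          intro q
          by_cases hq : q ∈ hs
          · rw [PySem.List.index?_append_of_mem _ hq, hf]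
          · have hq2 : q ∉ hs ++ [p] := by
              intro hmem
              rcases List.mem_append.1 hmem with h | h
              · exact hq h
              · simp at h
                subst h
                exact hq (List.mem_of_getElem hkp)
            rw [(PySem.List.index?_eq_none_iff _ _).2 hq2, hf q,
              (PySem.List.index?_eq_none_iff _ _).2 hq]
        have := ih (hs ++ [p]) first hf2
        rw [hlen1, ← hfull] at this
        rw [this]
        constructor
        · rintro ⟨a, b, ha, hb, hc, hd⟩
          refine ⟨a, b, ha, by simp at hb; omega, by simp at hc ⊢; omega, hd⟩
        · rintro ⟨a, b, ha, hb, hc, hd⟩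
          rcases Nat.eq_or_lt_of_le hb with rfl | hlt
          · -- b = hs.length : impossible, the first occurrence is within distance < 2
            exfalso
            rw [hhead] at hd
            have halt : a < hs.length := by omega
            rw [List.getElem?_append_left halt] at hd
            have hap : hs[a] = p := by
              have := List.getElem?_eq_getElem halt
              rw [this] at hd; exact Option.some.inj hd
            have : f' ≤ a := by
              by_contra hcon
              exact hmin a (by omega) hap
            omega
          · refine ⟨a, b, ha, by simp; omega, by simp at hc ⊢; omega, hd⟩
    | none =>
      have hnp : p ∉ hs := by
        have := hf p
        rw [hg] at this
        cases hix : PySem.List.index? hs p with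
        | none => exact (PySem.List.index?_eq_none_iff _ _).1 hix
        | some k => rw [hix] at this; simp at this
      have hf2 : ∀ q, (first.insert p (hs.length : Int)).get? q =
          (PySem.List.index? (hs ++ [p]) q).map (fun k => (k : Int)) := by
        intro q
        rw [PySem.Dict.get?_insert]
        by_cases hq : q = p
        · subst hq
          rw [PySem.List.index?_append_singleton_self hs q hnp]
          simp
        · simp only [hq, if_false]
          by_cases hq2 : q ∈ hs
          · rw [PySem.List.index?_append_of_mem _ hq2, hf]
          · have hq3 : q ∉ hs ++ [p] := by
              intro hmem
              rcases List.mem_append.1 hmem with h | h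
              · exact hq2 h
              · simp at h; exact hq h
            rw [(PySem.List.index?_eq_none_iff _ _).2 hq3, hf q,
              (PySem.List.index?_eq_none_iff _ _).2 hq2]
      have := ih (hs ++ [p]) (first.insert p (hs.length : Int)) hf2
      rw [hlen1, ← hfull] at this
      rw [this]
      constructor
      · rintro ⟨a, b, ha, hb, hc, hd⟩
        refine ⟨a, b, ha, by simp at hb; omega, by simp at hc ⊢; omega, hd⟩
      · rintro ⟨a, b, ha, hb, hc, hd⟩
        rcases Nat.eq_or_lt_of_le hb with rfl | hlt
        · exfalso
          rw [hhead] at hd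
          have halt : a < hs.length := by omega
          rw [List.getElem?_append_left halt] at hd
          have hap : hs[a] = p := by
            have := List.getElem?_eq_getElem halt
            rw [this] at hd; exact Option.some.inj hd
          exact hnp (List.mem_of_getElem hap)
        · refine ⟨a, b, ha, by simp; omega, by simp at hc ⊢; omega, hd⟩

theorem doublePair_B_iff (s : String) :
    doublePair_alt s = true ↔ pvE (pvPairs s.toList) := by
  unfold doublePair_alt
  rw [altLoop_eq_pvScan]
  have h0 : ((([] : List (List Char)).length : Int)) = 0 := by simp
  have := pvScan_iff (pvPairs s.toList) [] PySem.Dict.empty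
    (by intro p; simp [PySem.List.index?, PySem.Dict.get?_empty])
  rw [h0] at this
  simp only [List.nil_append, List.length_nil, Nat.zero_le, Nat.zero_add, true_and] at this
  rw [this]
  unfold pvE
  constructor
  · rintro ⟨a, b, h1, h2, h3⟩; exact ⟨a, b, h1, h2, h3⟩
  · rintro ⟨a, b, h1, h2, h3⟩; exact ⟨a, b, h1, h2, h3⟩

theorem pvPairs_length (cs : List Char) : (pvPairs cs).length = cs.length - 1 := by
  induction cs using pvPairs.induct with
  | case1 a b r ih => simp [pvPairs] at ih ⊢; omega
  | case2 cs h1 =>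
    match cs, h1 with
    | [], _ => rfl
    | [a], _ => rfl
    | a :: b :: r, h1 => exact (h1 a b r rfl).elim

theorem pvPairs_getElem? (cs : List Char) : ∀ (k : Nat), k + 1 < cs.length →
    (pvPairs cs)[k]? = some [cs.getD k ' ', cs.getD (k + 1) ' '] := by
  induction cs using pvPairs.induct with
  | case1 a b r ih =>
    intro k hk
    cases k with
    | zero => simp [pvPairs]
    | succ k' =>
      simp only [pvPairs, List.getElem?_cons_succ]
      have := ih k' (by simpa using hk)
      simpa using this
  | case2 cs h1 =>
    intro k hk
    match cs, h1 with
    | [], _ => simp at hk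
    | [a], _ => simp at hk
    | a :: b :: r, h1 => exact (h1 a b r rfl).elim

theorem compairJ_iff (array : List PvPairData) (ai : PvPairData) (js : List Int) :
    compairJ array ai js = true ↔ ∃ j ∈ js,
      ai.data = (PySem.List.pyGetD array j pvPD0).data ∧
      2 ≤ |ai.x - (PySem.List.pyGetD array j pvPD0).x| := by
  induction js with
  | nil => simp [compairJ]
  | cons j js ih =>
    simp only [compairJ]
    split_ifs with h1 h2
    · simp only [true_iff]
      exact ⟨j, List.mem_cons_self, h1, h2⟩
    · rw [ih]
      constructor
      · rintro ⟨j', hj', hd, hx⟩; exact ⟨j', List.mem_cons_of_mem _ hj', hd, hx⟩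
      · rintro ⟨j', hj', hd, hx⟩
        rcases List.mem_cons.1 hj' with rfl | hm
        · exact absurd hx h2
        · exact ⟨j', hm, hd, hx⟩
    · rw [ih]
      constructor
      · rintro ⟨j', hj', hd, hx⟩; exact ⟨j', List.mem_cons_of_mem _ hj', hd, hx⟩
      · rintro ⟨j', hj', hd, hx⟩
        rcases List.mem_cons.1 hj' with rfl | hm
        · exact absurd hd h1
        · exact ⟨j', hm, hd, hx⟩

theorem compairI_iff (array : List PvPairData) (is : List Int) :
    compairI array is = true ↔ ∃ i ∈ is,
      compairJ array (PySem.List.pyGetD array i pvPD0)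
        (PySem.List.pyRange (i + 1) (array.length : Int) 1) = true := by
  induction is with
  | nil => simp [compairI]
  | cons i is ih =>
    simp only [compairI]
    split_ifs with h1
    · simp only [true_iff]
      exact ⟨i, List.mem_cons_self, h1⟩
    · rw [ih]
      constructor
      · rintro ⟨i', hi', h⟩; exact ⟨i', List.mem_cons_of_mem _ hi', h⟩
      · rintro ⟨i', hi', h⟩
        rcases List.mem_cons.1 hi' with rfl | hm
        · exact absurd h (by simpa using h1)
        · exact ⟨i', hm, h⟩

theorem doublePair_A_iff (s : String) :
    doublePair s = true ↔ pvE (pvPairs s.toList) := by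
  unfold doublePair
  simp only []
  set cs := s.toList with hcs
  set m := cs.length - 1 with hm
  set pdf : Int → PvPairData :=
    (fun i => { data := [PySem.List.pyGetD cs i ' ', PySem.List.pyGetD cs (i + 1) ' '],
                x := i, y := i + 1 : PvPairData }) with hpdf
  have hrange : PySem.List.pyRange 0 ((cs.length : Int) - 1) 1 = PySem.List.pyRange 0 (m : Int) 1 := by
    cases hn : cs.length with
    | zero =>
      rw [PySem.List.pyRange_one_eq_nil (by omega), PySem.List.pyRange_one_eq_nil (by omega)]
    | succ n' => congr 1; omega
  rw [hrange]
  set datas := (PySem.List.pyRange 0 (m : Int) 1).map pdf with hdatas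
  have hlen : datas.length = m := by
    simp [hdatas, PySem.List.length_pyRange_one]
  have hget : ∀ k : Nat, k < m → PySem.List.pyGetD datas (k : Int) pvPD0 = pdf (k : Int) := by
    intro k hk
    exact PySem.List.pyGetD_map_pyRange pdf m k pvPD0 hk
  have hdata : ∀ k : Nat, (pdf (k : Int)).data = [cs.getD k ' ', cs.getD (k + 1) ' '] := by
    intro k
    simp only [hpdf]
    have : ((k : Int) + 1) = ((k + 1 : Nat) : Int) := by push_cast; omega
    rw [this, PySem.List.pyGetD_natCast, PySem.List.pyGetD_natCast]
  have hpairs : ∀ k : Nat, k < m → (pvPairs cs)[k]? = some [cs.getD k ' ', cs.getD (k + 1) ' '] := by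
    intro k hk
    exact pvPairs_getElem? cs k (by omega)
  unfold compairArray
  rw [hlen]
  rw [compairI_iff]
  constructor
  · rintro ⟨i, hi, hJ⟩
    rw [PySem.List.mem_pyRange_one] at hi
    obtain ⟨k, rfl, hk⟩ : ∃ k : Nat, i = (k : Int) ∧ k < m := ⟨i.toNat, by omega, by omega⟩
    rw [hget k hk, hlen] at hJ
    rw [compairJ_iff] at hJ
    obtain ⟨j, hj, hd, hx⟩ := hJ
    rw [PySem.List.mem_pyRange_one] at hj
    obtain ⟨l, rfl, hkl, hlm⟩ : ∃ l : Nat, j = (l : Int) ∧ k + 1 ≤ l ∧ l < m :=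
      ⟨j.toNat, by omega, by omega, by omega⟩
    rw [hget l hlm] at hd hx
    have hkl2 : k + 2 ≤ l := by
      simp only [hpdf] at hx
      rcases le_abs.1 hx with h | h <;> omega
    refine ⟨k, l, hkl2, by rw [pvPairs_length]; omega, ?_⟩
    rw [hpairs k hk, hpairs l hlm]
    rw [hdata, hdata] at hd
    rw [hd]
  · rintro ⟨a, b, hab, hb, heq⟩
    rw [pvPairs_length] at hb
    have hbm : b < m := by omega
    have ham : a < m := by omega
    refine ⟨(a : Int), by rw [PySem.List.mem_pyRange_one]; omega, ?_⟩
    rw [hget a ham, hlen, compairJ_iff]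
    refine ⟨(b : Int), by rw [PySem.List.mem_pyRange_one]; omega, ?_, ?_⟩
    · rw [hget b hbm, hdata, hdata]
      rw [hpairs a ham, hpairs b hbm] at heq
      exact Option.some.inj heq
    · rw [hget b hbm]
      simp only [hpdf]
      refine le_abs.2 (Or.inr ?_)
      omega

-- ===== VERDICT (by name: the statement is the Claim_ definition above) =====
theorem doublePair_spec : Claim_equal_doublePair := by
  intro s _
  unfold Spec_doublePair
  cases hA : doublePair s with
  | true =>
    exact ((doublePair_B_iff s).2 ((doublePair_A_iff s).1 hA)).symm
  | false =>
    cases hB : doublePair_alt s with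
    | true => exact absurd ((doublePair_A_iff s).2 ((doublePair_B_iff s).1 hB)) (by simp [hA])
    | false => rfl
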